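-- pv_equiv track=rewrite | github.com/sadosystems/upb-zig | upb_zig/conformance/check_readme_conformance.py | extract_table_from_report
-- ===== SOURCE A (Python) =====
-- def extract_table_from_report(report: str) -> str:
--     """Extract just the table portion from the full report."""
--     lines = report.split("\n")
--     start_idx = next((i for i, line in enumerate(lines) if line.startswith("|")), None)
--     if start_idx is None:
--         return ""
--     table_lines = lines[start_idx:]
--     while table_lines and table_lines[-1] == "":
--         table_lines.pop()
--     return "\n".join(table_lines)
-- ===== SOURCE B (Python) =====
-- def extract_table_from_report(report: str) -> str:
--     """Extract just the table portion from the full report."""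
--     if report.startswith("|"):
--         start = 0
--     else:
--         i = report.find("\n|")
--         if i == -1:
--             return ""
--         start = i + 1
--     return report[start:].rstrip("\n")
-- ===== Notes on version B (the rewrite author's own statement) =====
-- stated objective: simpler
-- what changed: B works on the raw string: a prefix check and one substring search locate where the table starts, and trailing blank lines are removed by stripping trailing newline characters, instead of splitting the report into a list of lines, scanning it with enumerate, popping trailing empty lines and rejoining.
import Mathlib
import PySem

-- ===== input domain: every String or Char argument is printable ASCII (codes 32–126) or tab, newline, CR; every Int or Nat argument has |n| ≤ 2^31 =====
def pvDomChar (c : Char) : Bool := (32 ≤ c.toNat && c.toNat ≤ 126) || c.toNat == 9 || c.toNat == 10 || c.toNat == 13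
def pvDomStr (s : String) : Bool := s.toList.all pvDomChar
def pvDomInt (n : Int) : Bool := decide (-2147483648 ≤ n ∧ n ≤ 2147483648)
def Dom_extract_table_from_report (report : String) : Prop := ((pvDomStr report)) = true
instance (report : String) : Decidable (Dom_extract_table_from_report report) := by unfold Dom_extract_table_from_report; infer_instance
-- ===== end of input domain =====

-- B extracts the table from the raw string (startswith('|') / find("\n|") / rstrip("\n"))
-- instead of splitting into a line list, scanning it, popping trailing empties and rejoining.
-- Both programs are total; the equivalence below is exact on the whole domain.

-- ===== PORT A =====
-- port of: next((i for i, line in enumerate(lines) if line.startswith("|")), None)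
def pvFindStart (i : Nat) : List (List Char) → Option Nat
  | [] => none
  | l :: ls => if PySem.Chars.startswith l ['|'] then some i else pvFindStart (i + 1) ls

-- port of: while table_lines and table_lines[-1] == "": table_lines.pop()
def pvPopEmpty (xs : List (List Char)) : List (List Char) :=
  if h : xs ≠ [] ∧ xs.getLast? = some [] then pvPopEmpty xs.dropLast else xs
termination_by xs.length
decreasing_by
  have := List.length_pos_of_ne_nil h.1
  simp [List.length_dropLast]; omega

def extract_table_from_report (report : String) : String :=
  let lines := PySem.Chars.splitOn report.toList ['\n']   -- report.split("\n")
  match pvFindStart 0 lines with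
  | none => ""
  | some i =>   -- lines[start_idx:] with start_idx ≥ 0 is List.drop
      String.mk (PySem.Chars.join ['\n'] (pvPopEmpty (lines.drop i)))

-- ===== PORT B =====
-- exact port of s.rstrip("\n"): drop the trailing '\n' characters
def pvRstripNl (cs : List Char) : List Char :=
  (cs.reverse.dropWhile (· == '\n')).reverse

def extract_table_from_report_alt (report : String) : String :=
  let cs := report.toList
  if PySem.Chars.startswith cs ['|'] then String.mk (pvRstripNl cs)
  else
    let i := PySem.Chars.find cs ['\n', '|']
    if i = -1 then ""
    else String.mk (pvRstripNl (cs.drop (i.toNat + 1)))   -- i ≥ 0 here, so report[i+1:] = drop (i+1)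

-- ===== PRECONDITION & SPEC =====
def Spec_extract_table_from_report (report : String) (out : String) : Prop := out = extract_table_from_report_alt report
instance (report : String) (out : String) : Decidable (Spec_extract_table_from_report report out) := by unfold Spec_extract_table_from_report; infer_instance

-- ===== CLAIM (what is proved, stated in full; the proofs are below) =====
def Claim_equal_extract_table_from_report : Prop := ∀ (report : String), Dom_extract_table_from_report report → Spec_extract_table_from_report report (extract_table_from_report report)

-- ===== LEMMAS AND PROOFS =====

-- (first line, remaining lines) of splitting on '\n' — proof-side recursion
def lSplit : List Char → List Char × List (List Char)
  | [] => ([], [])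
  | c :: r => if c = '\n' then ([], (lSplit r).1 :: (lSplit r).2) else (c :: (lSplit r).1, (lSplit r).2)

lemma lSplit_nl (r : List Char) : lSplit ('\n' :: r) = ([], (lSplit r).1 :: (lSplit r).2) := by
  simp [lSplit]

lemma lSplit_cons {c : Char} (r : List Char) (hc : c ≠ '\n') :
    lSplit (c :: r) = (c :: (lSplit r).1, (lSplit r).2) := by
  simp [lSplit, hc]

-- the suffix of the line list from the first line starting with '|'
def suffFrom : List (List Char) → Option (List (List Char))
  | [] => none
  | l :: ls => if PySem.Chars.startswith l ['|'] then some (l :: ls) else suffFrom ls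

-- the else-branch of B at the Chars level
def pvG (cs : List Char) : List Char :=
  if PySem.Chars.find cs ['\n', '|'] = -1 then []
  else pvRstripNl (cs.drop ((PySem.Chars.find cs ['\n', '|']).toNat + 1))

lemma go_eq (l : List Char) : ∀ (fuel : Nat) (cur : List Char) (acc : List (List Char)),
    l.length < fuel →
    PySem.Chars.splitOn.go ['\n'] fuel l cur acc
      = acc.reverse ++ (cur.reverse ++ (lSplit l).1) :: (lSplit l).2 := by
  induction l with
  | nil =>
    intro fuel cur acc _
    cases fuel <;> rw [PySem.Chars.splitOn.go] <;> simp [lSplit]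
  | cons c r ih =>
    intro fuel cur acc h
    cases fuel with
    | zero => omega
    | succ f =>
      rw [PySem.Chars.splitOn.go]
      by_cases hc : c = '\n'
      · subst hc
        simp only [List.isPrefixOf, BEq.rfl, Bool.true_and, if_pos]
        rw [show List.drop ['\n'].length ('\n' :: r) = r from rfl]
        rw [ih f [] (cur.reverse :: acc) (by simp at h; omega), lSplit_nl]
        simp
      · rw [if_neg (by simp [List.isPrefixOf, (Ne.symm hc)])]
        rw [ih f (c :: cur) acc (by simp at h; omega), lSplit_cons r hc]
        simp

lemma splitOn_eq (s : List Char) :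
    PySem.Chars.splitOn s ['\n'] = (lSplit s).1 :: (lSplit s).2 := by
  have := go_eq s (s.length + 1) [] [] (by omega)
  simpa [PySem.Chars.splitOn] using this

lemma pvFindStart_ge {ls : List (List Char)} : ∀ {i j : Nat}, pvFindStart i ls = some j → i ≤ j := by
  induction ls with
  | nil => intro i j h; simp [pvFindStart] at h
  | cons l t ih =>
    intro i j h
    simp only [pvFindStart] at h
    split at h
    · exact le_of_eq (Option.some.inj h)
    · have := ih h; omega

lemma findStart_drop (ls : List (List Char)) : ∀ (i : Nat),
    (pvFindStart i ls).map (fun j => ls.drop (j - i)) = suffFrom ls := by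
  induction ls with
  | nil => intro i; simp [pvFindStart, suffFrom]
  | cons l t ih =>
    intro i
    simp only [pvFindStart, suffFrom]
    split
    · simp
    · rw [← ih (i + 1)]
      cases h : pvFindStart (i + 1) t with
      | none => simp
      | some j =>
        have hij := pvFindStart_ge h
        simp only [Option.map_some]
        congr 1
        have : j - i = (j - (i + 1)) + 1 := by omega
        rw [this]
        simp

lemma popEmpty_eq (xs : List (List Char)) :
    pvPopEmpty xs = (xs.reverse.dropWhile (· == [])).reverse := by
  induction xs using pvPopEmpty.induct with
  | case1 xs h ih =>
    rw [pvPopEmpty, dif_pos h, ih]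
    obtain ⟨hne, hlast⟩ := h
    rcases List.eq_nil_or_concat xs with rfl | ⟨ys, a, rfl⟩
    · exact absurd rfl hne
    · have ha : a = [] := by
        simpa [List.getLast?_concat] using hlast
      subst ha
      simp
  | case2 xs h =>
    rw [pvPopEmpty, dif_neg h]
    rcases List.eq_nil_or_concat xs with rfl | ⟨ys, a, rfl⟩
    · simp
    · have ha : a ≠ [] := by
        intro hk
        exact h ⟨by simp, by simp [hk]⟩
      simp [ha]

lemma popEmpty_cons (l : List Char) (L : List (List Char)) :
    pvPopEmpty (l :: L) = if pvPopEmpty L = [] then (if l = [] then [] else [l]) else l :: pvPopEmpty L := by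
  simp only [popEmpty_eq, List.reverse_cons, List.dropWhile_append]
  cases hL : List.dropWhile (fun x => x == ([] : List Char)) L.reverse with
  | nil =>
    by_cases hl : l = []
    · simp [List.dropWhile, hl]
    · have hE : l.isEmpty = false := by simpa using hl
      simp [List.dropWhile, hl, hE]
  | cons x xs => simp

lemma rstrip_cons (c : Char) (r : List Char) :
    pvRstripNl (c :: r) = if pvRstripNl r = [] then (if c = '\n' then [] else [c]) else c :: pvRstripNl r := by
  simp only [pvRstripNl, List.reverse_cons, List.dropWhile_append]
  cases hr : List.dropWhile (fun x => x == '\n') r.reverse with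
  | nil =>
    by_cases hc : c = '\n'
    · simp [List.dropWhile, hc]
    · have hE : (c == '\n') = false := by simpa using hc
      simp [List.dropWhile, hc, hE]
  | cons x xs => simp

lemma popEmpty_ne_singleton_nil (L : List (List Char)) : pvPopEmpty L ≠ [[]] := by
  induction L using pvPopEmpty.induct with
  | case1 xs h ih => rw [pvPopEmpty, dif_pos h]; exact ih
  | case2 xs h =>
    rw [pvPopEmpty, dif_neg h]
    intro hx
    subst hx
    simp at h

lemma join_nl_eq_nil_iff (M : List (List Char)) :
    PySem.Chars.join ['\n'] M = [] ↔ (M = [] ∨ M = [[]]) := by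
  cases M with
  | nil => simp [PySem.Chars.join_nil]
  | cons a t =>
    cases t with
    | nil => simp [PySem.Chars.join_singleton]
    | cons b t' => simp [PySem.Chars.join_cons_cons]

lemma join_popEmpty_nil_iff (L : List (List Char)) :
    PySem.Chars.join ['\n'] (pvPopEmpty L) = [] ↔ pvPopEmpty L = [] := by
  rw [join_nl_eq_nil_iff]
  have := popEmpty_ne_singleton_nil L
  tauto

lemma join_popEmpty_cons_cons (c : Char) (f : List Char) (S : List (List Char)) :
    PySem.Chars.join ['\n'] (pvPopEmpty ((c :: f) :: S))
      = c :: PySem.Chars.join ['\n'] (pvPopEmpty (f :: S)) := by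
  rw [popEmpty_cons, popEmpty_cons]
  by_cases hS : pvPopEmpty S = []
  · by_cases hf : f = [] <;>
      simp [hS, hf, PySem.Chars.join_singleton, PySem.Chars.join_nil]
  · cases h : pvPopEmpty S with
    | nil => exact absurd h hS
    | cons x xs =>
      simp [PySem.Chars.join_cons_cons]

lemma join_popEmpty_rstrip (cs : List Char) :
    PySem.Chars.join ['\n'] (pvPopEmpty ((lSplit cs).1 :: (lSplit cs).2)) = pvRstripNl cs := by
  induction cs with
  | nil => simp [lSplit, popEmpty_cons, pvPopEmpty, PySem.Chars.join_nil, pvRstripNl]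
  | cons c r ih =>
    by_cases hc : c = '\n'
    · subst hc
      rw [lSplit_nl]
      dsimp only
      rw [popEmpty_cons, rstrip_cons]
      by_cases hnil : pvPopEmpty ((lSplit r).1 :: (lSplit r).2) = []
      · have : pvRstripNl r = [] := by rw [← ih, hnil, PySem.Chars.join_nil]
        simp [hnil, this, PySem.Chars.join_nil]
      · have hr : pvRstripNl r ≠ [] := by
          rw [← ih]; rwa [Ne, join_popEmpty_nil_iff]
        rw [if_neg hnil, if_neg hr]
        cases h : pvPopEmpty ((lSplit r).1 :: (lSplit r).2) with
        | nil => exact absurd h hnil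
        | cons x xs =>
          rw [h] at ih
          rw [PySem.Chars.join_cons_cons, ih]
          rfl
    · rw [lSplit_cons r hc]
      dsimp only
      rw [join_popEmpty_cons_cons, ih, rstrip_cons]
      by_cases h : pvRstripNl r = [] <;> simp [h, hc]

lemma fst_startswith (cs : List Char) :
    PySem.Chars.startswith (lSplit cs).1 ['|'] = PySem.Chars.startswith cs ['|'] := by
  cases cs with
  | nil => simp [lSplit]
  | cons c r =>
    by_cases hc : c = '\n'
    · subst hc
      simp [lSplit, PySem.Chars.startswith, List.isPrefixOf]
    · simp [lSplit, hc, PySem.Chars.startswith, List.isPrefixOf]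

lemma find_eq_of (s p : List Char) (m : Nat) (h1 : p <+: s.drop m)
    (h2 : ∀ i < m, ¬ p <+: s.drop i) : PySem.Chars.find s p = m := by
  have hin : PySem.Chars.isIn p s = true := (PySem.Chars.exists_prefix_drop_iff_isIn p s).1 ⟨m, h1⟩
  have hinf : p <:+: s := (PySem.Chars.isIn_iff_infix p s).1 hin
  have hnn : 0 ≤ PySem.Chars.find s p := (PySem.Chars.find_nonneg_iff s p).2 hinf
  obtain ⟨hpre, hmin⟩ := PySem.Chars.find_spec hnn
  have : (PySem.Chars.find s p).toNat = m := by
    rcases lt_trichotomy (PySem.Chars.find s p).toNat m with h | h | h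
    · exact absurd hpre (h2 _ h)
    · exact h
    · exact absurd h1 (hmin m h)
  omega

lemma find_prefix {s p : List Char} (h : p <+: s) : PySem.Chars.find s p = 0 :=
  find_eq_of s p 0 (by simpa using h) (by omega)

lemma find_cons_not_prefix {c : Char} {r p : List Char} (h : ¬ p <+: (c :: r)) :
    PySem.Chars.find (c :: r) p
      = if PySem.Chars.find r p = -1 then -1 else PySem.Chars.find r p + 1 := by
  by_cases hf : PySem.Chars.find r p = -1
  · rw [if_pos hf]
    rw [PySem.Chars.find_eq_neg_one_iff] at hf ⊢
    intro hinf
    obtain ⟨j, hj⟩ := (PySem.Chars.exists_prefix_drop_iff_isIn p (c :: r)).2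
      ((PySem.Chars.isIn_iff_infix p (c :: r)).2 hinf)
    cases j with
    | zero => exact h (by simpa using hj)
    | succ j' =>
      exact hf ((PySem.Chars.isIn_iff_infix p r).1
        ((PySem.Chars.exists_prefix_drop_iff_isIn p r).1 ⟨j', by simpa using hj⟩))
  · rw [if_neg hf]
    have hnn : 0 ≤ PySem.Chars.find r p := by
      have := PySem.Chars.neg_one_le_find r p
      omega
    obtain ⟨hpre, hmin⟩ := PySem.Chars.find_spec hnn
    have := find_eq_of (c :: r) p ((PySem.Chars.find r p).toNat + 1)
      (by simpa using hpre)
      (by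
        intro i hi
        cases i with
        | zero => simpa using h
        | succ i' =>
          have : i' < (PySem.Chars.find r p).toNat := by omega
          simpa using hmin i' this)
    omega

lemma prefix_pat_cons (c : Char) (r : List Char) :
    (['\n', '|'] <+: (c :: r)) ↔ (c = '\n' ∧ ['|'] <+: r) := by
  constructor
  · intro h
    rw [List.cons_prefix_cons] at h
    exact ⟨h.1.symm, h.2⟩
  · rintro ⟨hc, hr⟩
    subst hc
    exact List.cons_prefix_cons.2 ⟨rfl, hr⟩

lemma startswith_bar_iff (r : List Char) :
    PySem.Chars.startswith r ['|'] = true ↔ ['|'] <+: r := PySem.Chars.startswith_iff r ['|']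

lemma M' (cs : List Char) :
    (match suffFrom (lSplit cs).2 with
     | none => []
     | some suf => PySem.Chars.join ['\n'] (pvPopEmpty suf)) = pvG cs := by
  induction cs with
  | nil =>
    simp [lSplit, suffFrom, pvG, show PySem.Chars.find [] ['\n','|'] = -1 from rfl]
  | cons c r ih =>
    by_cases hc : c = '\n'
    · subst hc
      rw [lSplit_nl]
      dsimp only
      show (match suffFrom ((lSplit r).1 :: (lSplit r).2) with
            | none => []
            | some suf => PySem.Chars.join ['\n'] (pvPopEmpty suf)) = pvG ('\n' :: r)
      rw [show suffFrom ((lSplit r).1 :: (lSplit r).2)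
            = if PySem.Chars.startswith (lSplit r).1 ['|'] then some ((lSplit r).1 :: (lSplit r).2)
              else suffFrom (lSplit r).2 from rfl]
      rw [fst_startswith]
      by_cases hb : PySem.Chars.startswith r ['|'] = true
      · have hpre : ['\n', '|'] <+: ('\n' :: r) :=
          (prefix_pat_cons _ _).2 ⟨rfl, (startswith_bar_iff r).1 hb⟩
        have hfind := find_prefix hpre
        simp only [hb, if_pos]
        rw [join_popEmpty_rstrip]
        simp [pvG, hfind]
      · simp only [hb, Bool.false_eq_true, if_false]
        rw [ih]
        have hnp : ¬ (['\n', '|'] <+: ('\n' :: r)) := by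
          rw [prefix_pat_cons]
          rintro ⟨-, hr⟩
          exact hb ((startswith_bar_iff r).2 hr)
        have hshift := find_cons_not_prefix (c := '\n') (r := r) (p := ['\n','|']) hnp
        by_cases hm : PySem.Chars.find r ['\n','|'] = -1
        · simp [pvG, hshift, hm]
        · have hnn : 0 ≤ PySem.Chars.find r ['\n','|'] := by
            have := PySem.Chars.neg_one_le_find r ['\n','|']
            omega
          simp only [pvG, hshift, hm, if_false]
          rw [if_neg (by omega)]
          congr 1
          have : (PySem.Chars.find r ['\n','|'] + 1).toNat + 1
              = ((PySem.Chars.find r ['\n','|']).toNat + 1) + 1 := by omega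
          rw [this]
          simp
    · rw [lSplit_cons r hc]
      dsimp only
      rw [ih]
      have hnp : ¬ (['\n', '|'] <+: (c :: r)) := by
        rw [prefix_pat_cons]
        rintro ⟨h1, -⟩
        exact hc h1
      have hshift := find_cons_not_prefix (c := c) (r := r) (p := ['\n','|']) hnp
      by_cases hm : PySem.Chars.find r ['\n','|'] = -1
      · simp [pvG, hshift, hm]
      · have hnn : 0 ≤ PySem.Chars.find r ['\n','|'] := by
          have := PySem.Chars.neg_one_le_find r ['\n','|']
          omega
        simp only [pvG, hshift, hm, if_false]
        rw [if_neg (by omega)]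
        congr 1
        have : (PySem.Chars.find r ['\n','|'] + 1).toNat + 1
            = ((PySem.Chars.find r ['\n','|']).toNat + 1) + 1 := by omega
        rw [this]
        simp

lemma main_chars (cs : List Char) :
    (match pvFindStart 0 ((lSplit cs).1 :: (lSplit cs).2) with
     | none => []
     | some i => PySem.Chars.join ['\n'] (pvPopEmpty (((lSplit cs).1 :: (lSplit cs).2).drop i)))
    = (if PySem.Chars.startswith cs ['|'] then pvRstripNl cs else pvG cs) := by
  have hdrop := findStart_drop ((lSplit cs).1 :: (lSplit cs).2) 0
  have hsw := fst_startswith cs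
  have hsuff : suffFrom ((lSplit cs).1 :: (lSplit cs).2)
      = if PySem.Chars.startswith (lSplit cs).1 ['|'] then some ((lSplit cs).1 :: (lSplit cs).2)
        else suffFrom (lSplit cs).2 := rfl
  have hM := M' cs
  by_cases hb : PySem.Chars.startswith cs ['|'] = true
  · rw [if_pos hb]
    have hs2 : suffFrom ((lSplit cs).1 :: (lSplit cs).2) = some ((lSplit cs).1 :: (lSplit cs).2) := by
      rw [hsuff, hsw, hb, if_pos rfl]
    cases hfs : pvFindStart 0 ((lSplit cs).1 :: (lSplit cs).2) with
    | none =>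
      rw [hfs] at hdrop
      rw [hs2] at hdrop
      simp at hdrop
    | some i =>
      rw [hfs] at hdrop
      rw [hs2] at hdrop
      simp only [Option.map_some, Nat.sub_zero, Option.some.injEq] at hdrop
      show PySem.Chars.join ['\n'] (pvPopEmpty (((lSplit cs).1 :: (lSplit cs).2).drop i)) = pvRstripNl cs
      rw [hdrop, join_popEmpty_rstrip]
  · rw [if_neg hb]
    have hbf : PySem.Chars.startswith cs ['|'] = false := by
      simpa using hb
    have hs2 : suffFrom ((lSplit cs).1 :: (lSplit cs).2) = suffFrom (lSplit cs).2 := by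
      rw [hsuff, hsw, hbf]
      simp
    cases hfs : pvFindStart 0 ((lSplit cs).1 :: (lSplit cs).2) with
    | none =>
      rw [hfs] at hdrop
      simp only [Option.map_none] at hdrop
      rw [hs2] at hdrop
      rw [← hdrop] at hM
      exact hM
    | some i =>
      rw [hfs] at hdrop
      simp only [Option.map_some, Nat.sub_zero] at hdrop
      rw [hs2] at hdrop
      rw [← hdrop] at hM
      exact hM

-- ===== VERDICT (by name: the statement is the Claim_ definition above) =====
theorem extract_table_from_report_spec : Claim_equal_extract_table_from_report := by
  intro report _
  show extract_table_from_report report = extract_table_from_report_alt report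
  have h := main_chars report.toList
  simp only [extract_table_from_report, extract_table_from_report_alt]
  rw [splitOn_eq]
  cases hfs : pvFindStart 0 ((lSplit report.toList).1 :: (lSplit report.toList).2) with
  | none =>
    rw [hfs] at h
    dsimp only at h
    show ("" : String) = _
    by_cases hb : PySem.Chars.startswith report.toList ['|'] = true
    · rw [if_pos hb] at h ⊢
      rw [← h]
      rfl
    · rw [if_neg hb] at h ⊢
      rw [pvG] at h
      by_cases hf : PySem.Chars.find report.toList ['\n','|'] = -1
      · rw [if_pos hf]
      · rw [if_neg hf] at h ⊢
        rw [← h]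
        rfl
  | some i =>
    rw [hfs] at h
    dsimp only at h
    show String.mk (PySem.Chars.join ['\n']
      (pvPopEmpty (((lSplit report.toList).1 :: (lSplit report.toList).2).drop i))) = _
    by_cases hb : PySem.Chars.startswith report.toList ['|'] = true
    · rw [if_pos hb] at h ⊢
      rw [h]
    · rw [if_neg hb] at h ⊢
      rw [pvG] at h
      by_cases hf : PySem.Chars.find report.toList ['\n','|'] = -1
      · rw [if_pos hf] at h ⊢
        rw [h]
        rfl
      · rw [if_neg hf] at h ⊢
        rw [h]
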